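-- pv_equiv track=rewrite | github.com/fciceri17/aoc23 | day12.py | complete_groups
-- ===== SOURCE A (Python) =====
-- def complete_groups(candidate, expected):
--      roll = 0
--      i=0
--      for c in candidate:
--           if c=='?':
--                return True
--           if c=='.':
--                if roll>0:
--                     if roll != expected[i]:
--                          return False
--                     i+=1
--                     if i==len(expected):
--                          return True
--                roll=0
--           if c=='#':
--                roll+=1
--      return i==len(expected) or roll==expected[i]
-- ===== SOURCE B (Python) =====
-- def complete_groups(candidate, expected):
--     q = candidate.find('?')
--     head = candidate if q < 0 else candidate[:q]
--     counts = [s.count('#') for s in head.split('.')]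
--     closed = [c for c in counts[:-1] if c > 0]
--     k = len(expected)
--     if closed[:k] != expected[:len(closed)]:
--         return False
--     return len(closed) >= k or q >= 0 or counts[-1] == expected[len(closed)]
-- ===== Notes on version B (the rewrite author's own statement) =====
-- stated objective: idiomatic
-- what changed: Replaces A's character-by-character state machine (roll counter, index i, four early returns) with a declarative pipeline (the scanning is done by the C-level str.split/str.count instead of a Python-level character loop): split the prefix before the first '?' on '.', count '#' per piece, and compare the list of fully closed group counts against the matching prefix of expected with a single slice comparison. Pre_ excludes only the inputs where A raises IndexError (expected empty while the prefix before the first '?' closes a '#'-group).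
import Mathlib
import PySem

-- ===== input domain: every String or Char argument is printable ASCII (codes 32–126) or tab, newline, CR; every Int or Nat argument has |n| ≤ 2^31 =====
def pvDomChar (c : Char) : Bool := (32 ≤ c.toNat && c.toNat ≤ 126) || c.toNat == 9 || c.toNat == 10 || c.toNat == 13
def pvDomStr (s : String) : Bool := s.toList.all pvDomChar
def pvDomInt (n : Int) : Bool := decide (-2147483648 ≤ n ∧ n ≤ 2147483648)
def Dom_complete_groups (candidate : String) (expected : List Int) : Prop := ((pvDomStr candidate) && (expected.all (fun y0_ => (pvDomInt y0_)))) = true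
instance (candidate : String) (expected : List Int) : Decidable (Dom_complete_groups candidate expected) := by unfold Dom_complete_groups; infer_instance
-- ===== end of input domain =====

-- B replaces A's char-by-char state machine with an idiomatic split-on-'.'-and-count-'#' pipeline comparing the closed groups against expected by one slice comparison; Pre_ excludes only inputs where A raises IndexError.


-- ===== PORT A =====
-- the for-loop with early returns; `(PySem.List.pyGet? expected i).getD 0` is `expected[i]`,
-- whose raising case (none) is excluded by Pre_ (the .getD 0 default is never reached there)
def completeGroupsGo (cs : List Char) (roll i : Int) (expected : List Int) : Bool :=
  match cs with
  | [] => (i == (expected.length : Int)) || (roll == (PySem.List.pyGet? expected i).getD 0)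
  | c :: rest =>
    if c == '?' then true
    else if c == '.' then
      if roll > 0 then
        if roll != (PySem.List.pyGet? expected i).getD 0 then false
        else if i + 1 == (expected.length : Int) then true
        else completeGroupsGo rest 0 (i + 1) expected
      else completeGroupsGo rest 0 i expected
    else if c == '#' then completeGroupsGo rest (roll + 1) i expected
    else completeGroupsGo rest roll i expected

def complete_groups (candidate : String) (expected : List Int) : Bool :=
  completeGroupsGo candidate.toList 0 0 expected

-- ===== PORT B =====
-- head.split('.') with a one-char separator is PySem.Chars.splitOn on the code points;
-- s.count('#') is PySem.Chars.count; closed[:k] != expected[:len(closed)] is the take-comparison;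
-- counts[-1] / expected[len(closed)] are pyGet? (the latter is reached only when in range)
def complete_groups_alt (candidate : String) (expected : List Int) : Bool :=
  let q := PySem.Str.find candidate "?"
  let head := if q < 0 then candidate else PySem.Str.slice candidate none (some q)
  let counts : List Int :=
    (PySem.Chars.splitOn head.toList ['.']).map (fun s => ((PySem.Chars.count s ['#'] : Nat) : Int))
  let closed := counts.dropLast.filter (fun c => c > 0)
  let k := expected.length
  if closed.take k ≠ expected.take closed.length then false
  else decide (closed.length ≥ k) || decide (q ≥ 0)
    || ((PySem.List.pyGet? counts (-1)).getD 0 == (PySem.List.pyGet? expected (closed.length : Int)).getD 0)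

-- ===== PRECONDITION & SPEC =====
-- Pre_ excludes exactly the inputs where the Python A raises IndexError (expected is empty while the
-- prefix before the first '?' closes a '#'-group, i.e. contains a '#' followed later by a '.').
def Pre_complete_groups (candidate : String) (expected : List Int) : Prop :=
  expected ≠ [] ∨ '.' ∉ ((candidate.toList.takeWhile (· ≠ '?')).dropWhile (· ≠ '#'))
instance (candidate : String) (expected : List Int) : Decidable (Pre_complete_groups candidate expected) := by
  unfold Pre_complete_groups; infer_instance

def pvWitness_complete_groups : String × List Int := ("#.##.?#", [1, 2])

def Spec_complete_groups (candidate : String) (expected : List Int) (out : Bool) : Prop := out = complete_groups_alt candidate expected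
instance (candidate : String) (expected : List Int) (out : Bool) : Decidable (Spec_complete_groups candidate expected out) := by unfold Spec_complete_groups; infer_instance

-- ===== CLAIM (what is proved, stated in full; the proofs are below) =====
def Claim_equal_complete_groups : Prop := ∀ (candidate : String) (expected : List Int), Dom_complete_groups candidate expected → Pre_complete_groups candidate expected → Spec_complete_groups candidate expected (complete_groups candidate expected)

-- ===== LEMMAS AND PROOFS =====

def mySplit (pre : List Char) : List Char → List (List Char)
  | [] => [pre]
  | c :: t => if c = '.' then pre :: mySplit [] t else mySplit (pre ++ [c]) t

theorem splitOnGo_eq (l : List Char) : ∀ (fuel : Nat) (cur : List Char) (acc : List (List Char)),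
    l.length ≤ fuel →
    PySem.Chars.splitOn.go ['.'] fuel l cur acc = acc.reverse ++ mySplit cur.reverse l := by
  induction l with
  | nil =>
    intro fuel cur acc _
    cases fuel <;> simp [PySem.Chars.splitOn.go, mySplit]
  | cons c t ih =>
    intro fuel cur acc h
    cases fuel with
    | zero => simp at h
    | succ f =>
      simp only [PySem.Chars.splitOn.go]
      by_cases hc : c = '.'
      · subst hc
        rw [if_pos (by simp [List.isPrefixOf])]
        simp only [List.length_cons, List.length_nil, List.drop_succ_cons, List.drop_zero]
        rw [ih f [] (cur.reverse :: acc) (by simpa using h)]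
        simp [mySplit]
      · rw [if_neg (by simp [List.isPrefixOf]; exact fun h => hc h.symm)]
        rw [ih f (c :: cur) acc (by simpa using h)]
        simp [mySplit, hc]

theorem splitOn_eq (l : List Char) : PySem.Chars.splitOn l ['.'] = mySplit [] l := by
  rw [PySem.Chars.splitOn, splitOnGo_eq l (l.length+1) [] [] (by omega)]; simp

theorem countGo_eq (l : List Char) : ∀ (fuel : Nat) (acc : Nat),
    l.length ≤ fuel →
    PySem.Chars.count.go ['#'] fuel l acc = acc + l.count '#' := by
  induction l with
  | nil => intro fuel acc _; cases fuel <;> simp [PySem.Chars.count.go]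
  | cons c t ih =>
    intro fuel acc h
    cases fuel with
    | zero => simp at h
    | succ f =>
      simp only [PySem.Chars.count.go]
      by_cases hc : c = '#'
      · subst hc
        rw [if_pos (by simp [List.isPrefixOf])]
        simp only [List.length_cons, List.length_nil, List.drop_succ_cons, List.drop_zero]
        rw [ih f (acc+1) (by simpa using h)]
        simp [List.count_cons]; omega
      · rw [if_neg (by simp [List.isPrefixOf]; exact fun h => hc h.symm)]
        rw [ih f acc (by simpa using h)]
        simp [List.count_cons, hc]

theorem count_single (s : List Char) : PySem.Chars.count s ['#'] = s.count '#' := by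
  rw [PySem.Chars.count]
  simp only [List.isEmpty_cons, if_neg]
  exact (countGo_eq s s.length 0 le_rfl).trans (by simp)

def countsOf : List Char → List Int
  | [] => [0]
  | c :: t =>
    if c = '.' then 0 :: countsOf t
    else match countsOf t with
      | [] => []
      | c0 :: r => ((if c = '#' then 1 else 0) + c0) :: r

def bump (r : Int) : List Int → List Int
  | [] => []
  | c :: t => (r + c) :: t

theorem countsOf_ne_nil (l : List Char) : countsOf l ≠ [] := by
  induction l with
  | nil => simp [countsOf]
  | cons c t ih =>
    simp only [countsOf]
    split
    · simp
    · cases h : countsOf t with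
      | nil => exact absurd h ih
      | cons c0 r => simp

theorem bump_zero (x : List Int) : bump 0 x = x := by
  cases x <;> simp [bump]

theorem map_count_mySplit (l : List Char) : ∀ pre : List Char,
    (mySplit pre l).map (fun s => ((PySem.Chars.count s ['#'] : Nat) : Int))
      = bump ((pre.count '#' : Nat) : Int) (countsOf l) := by
  induction l with
  | nil => intro pre; simp [mySplit, countsOf, bump, count_single]
  | cons c t ih =>
    intro pre
    by_cases hc : c = '.'
    · subst hc
      have h0 := ih []
      simp only [List.count_nil, Nat.cast_zero, bump_zero] at h0
      simp only [count_single] at h0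
      simp only [mySplit, if_pos rfl, countsOf, List.map_cons, bump]
      simp [count_single, h0]
    · simp only [mySplit, if_neg hc, countsOf, ih (pre ++ [c])]
      obtain ⟨c0, r, hct⟩ : ∃ c0 r, countsOf t = c0 :: r := by
        cases h : countsOf t with
        | nil => exact absurd h (countsOf_ne_nil t)
        | cons a b => exact ⟨a, b, rfl⟩
      rw [hct]
      simp only [if_neg hc, bump, List.count_append]
      by_cases h2 : c = '#' <;> simp [h2, List.count_singleton] <;> push_cast <;> ring

theorem take_eq_takeWhile (l : List Char) : ∀ (n : Nat),
    (∀ i, i < n → l[i]? ≠ some '?') → l[n]? = some '?' →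
    l.take n = l.takeWhile (· ≠ '?') := by
  induction l with
  | nil => intro n _ h2; simp at h2
  | cons c t ih =>
    intro n h1 h2
    cases n with
    | zero =>
      simp at h2
      simp [List.takeWhile_cons, h2]
    | succ m =>
      have hc : c ≠ '?' := by
        have := h1 0 (by omega)
        simpa using this
      simp only [List.take_succ_cons, List.takeWhile_cons, if_pos (by simpa using hc)]
      rw [ih m (fun i hi => by simpa using h1 (i+1) (by omega)) (by simpa using h2)]
      simp [hc]

-- A's loop over the closed groups, as its result characterization uses it
def completeGroupsLoop (closed : List Int) (expected : List Int) (j : Int) : Option Bool :=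
  match closed with
  | [] => none
  | c :: rest =>
    if c != (PySem.List.pyGet? expected j).getD 0 then some false
    else if j + 1 == (expected.length : Int) then some true
    else completeGroupsLoop rest expected (j + 1)

def altRun (l : List Char) (roll i : Int) (expected : List Int) : Bool :=
  let counts := bump roll (countsOf (l.takeWhile (· ≠ '?')))
  let closed := counts.dropLast.filter (fun c => c > 0)
  match completeGroupsLoop closed expected i with
  | some b => b
  | none =>
    if l.contains '?' then true
    else (decide (i + (closed.length : Int) = (expected.length : Int)))
      || (counts.getLast?.getD 0 == (PySem.List.pyGet? expected (i + (closed.length : Int))).getD 0)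

theorem main_go_eq (l : List Char) : ∀ (roll i : Int) (expected : List Int),
    completeGroupsGo l roll i expected = altRun l roll i expected := by
  induction l with
  | nil =>
    intro roll i e
    simp [completeGroupsGo, altRun, countsOf, bump, completeGroupsLoop, beq_eq_decide]
  | cons c t ih =>
    intro roll i e
    obtain ⟨c0, r, hct⟩ : ∃ c0 r, countsOf (t.takeWhile (· ≠ '?')) = c0 :: r := by
      cases h : countsOf (t.takeWhile (· ≠ '?')) with
      | nil => exact absurd h (countsOf_ne_nil _)
      | cons a b => exact ⟨a, b, rfl⟩
    by_cases hq : c = '?'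
    · subst hq
      simp [completeGroupsGo, altRun, countsOf, bump, completeGroupsLoop]
    by_cases hd : c = '.'
    · subst hd
      rw [show completeGroupsGo ('.' :: t) roll i e
        = (if roll > 0 then
            (if roll != (PySem.List.pyGet? e i).getD 0 then false
             else if i + 1 == (e.length : Int) then true
             else completeGroupsGo t 0 (i + 1) e)
           else completeGroupsGo t 0 i e) from by simp [completeGroupsGo]]
      have htw : (('.'::t).takeWhile (· ≠ '?')) = '.' :: t.takeWhile (· ≠ '?') := by simp
      simp only [altRun, htw, countsOf, if_pos rfl, hct, bump, List.contains_cons,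
        eq_self_iff_true, if_true, show (('?' : Char) == '.') = false from rfl, Bool.false_or]
      rw [List.dropLast_cons₂]
      by_cases hr : roll > 0
      · rw [if_pos hr]
        rw [show ((roll + 0) :: (c0 :: r).dropLast).filter (fun c => decide (c > 0))
            = (roll + 0) :: ((c0 :: r).dropLast.filter (fun c => decide (c > 0))) from by
          simp [List.filter_cons]; omega]
        simp only [completeGroupsLoop, show roll + 0 = roll from by ring]
        cases hne : (roll != (PySem.List.pyGet? e i).getD 0) with
        | true => simp [hne]
        | false =>
          simp only [hne, Bool.false_eq_true, if_false]
          cases hlen : (i + 1 == (e.length : Int)) with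
          | true => simp [hlen]
          | false =>
            simp only [hlen, Bool.false_eq_true, if_false]
            rw [ih 0 (i + 1) e]
            simp only [altRun, hct, bump_zero]
            cases completeGroupsLoop ((c0 :: r).dropLast.filter (fun c => decide (c > 0))) e (i + 1) with
            | some b => rfl
            | none =>
              simp only []
              cases t.contains '?' with
              | true => rfl
              | false =>
                simp only [Bool.false_eq_true, if_false, List.getLast?_cons_cons, List.length_cons]
                have harith : i + (((((c0 :: r).dropLast.filter (fun c => decide (c > 0))).length + 1 : Nat)) : Int)
                    = i + 1 + (((c0 :: r).dropLast.filter (fun c => decide (c > 0))).length : Int) := by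
                  push_cast; ring
                simp only [harith]
      · rw [if_neg hr]
        rw [show ((roll + 0) :: (c0 :: r).dropLast).filter (fun c => decide (c > 0))
            = (c0 :: r).dropLast.filter (fun c => decide (c > 0)) from by
          simp [List.filter_cons]; omega]
        rw [ih 0 i e]
        simp only [altRun, hct, bump_zero]
        cases completeGroupsLoop ((c0 :: r).dropLast.filter (fun c => decide (c > 0))) e i with
        | some b => rfl
        | none =>
          simp only []
          cases t.contains '?' with
          | true => rfl
          | false =>
            simp only [Bool.false_eq_true, if_false, List.getLast?_cons_cons]
    · -- c is not '.', not '?' : the current piece keeps growing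
      have htw : ((c :: t).takeWhile (· ≠ '?')) = c :: t.takeWhile (· ≠ '?') := by simp [hq]
      rw [show completeGroupsGo (c :: t) roll i e
        = (if c = '#' then completeGroupsGo t (roll + 1) i e else completeGroupsGo t roll i e) from by
          by_cases h2 : c = '#' <;> simp [completeGroupsGo, hq, hd, h2]]
      by_cases h2 : c = '#'
      · subst h2
        rw [if_pos rfl, ih (roll + 1) i e]
        simp only [altRun, htw, countsOf, if_neg hd, hct, if_pos rfl, bump, List.contains_cons,
          eq_self_iff_true, if_true, show (('?' : Char) == '#') = false from rfl, Bool.false_or]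
        simp only [show roll + (1 + c0) = roll + 1 + c0 from by ring]
      · rw [if_neg h2, ih roll i e]
        simp only [altRun, htw, countsOf, if_neg hd, hct, if_neg h2, bump, List.contains_cons,
          Bool.false_or, zero_add]
        have : (c == '?') = false := by simp [hq]
        rw [show ('?' == c) = false from by simp [Ne.symm hq]]
        simp

theorem pyGet?_neg_one_getLast? (xs : List Int) (h : xs ≠ []) :
    PySem.List.pyGet? xs (-1) = xs.getLast? := by
  simp [PySem.List.pyGet?, PySem.List.pyIdx?]
  rw [if_pos (by exact Nat.one_le_iff_ne_zero.mpr (by simpa using h))]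
  simp [List.getLast?_eq_getElem?]

theorem singleton_prefix_iff (a : Char) (m : List Char) : [a] <+: m ↔ m.head? = some a := by
  cases m <;> simp [List.cons_prefix_iff]

theorem counts_eq (hd : List Char) :
    (PySem.Chars.splitOn hd ['.']).map (fun s => ((PySem.Chars.count s ['#'] : Nat) : Int))
      = countsOf hd := by
  rw [splitOn_eq, map_count_mySplit hd []]
  simp [bump_zero]

theorem countsOf_length (l : List Char) : (countsOf l).length = l.count '.' + 1 := by
  induction l with
  | nil => simp [countsOf]
  | cons c t ih =>
    by_cases hc : c = '.'
    · subst hc; simp [countsOf, List.count_cons, ih]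
    · obtain ⟨c0, r, hct⟩ : ∃ c0 r, countsOf t = c0 :: r := by
        cases h : countsOf t with
        | nil => exact absurd h (countsOf_ne_nil t)
        | cons a b => exact ⟨a, b, rfl⟩
      simp only [countsOf, if_neg hc, hct]
      rw [hct] at ih
      simp only [List.length_cons] at ih ⊢
      simpa [List.count_cons, hc] using ih

-- if the head closes no '#'-group (no '.' after the first '#'), the closed-groups list is empty
theorem closed_nil (l : List Char) (h : '.' ∉ l.dropWhile (· ≠ '#')) :
    ((countsOf l).dropLast.filter (fun c => decide (c > 0))) = [] := by
  induction l with
  | nil => simp [countsOf]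
  | cons c t ih =>
    by_cases hc : c = '.'
    · subst hc
      have hd : (('.' :: t).dropWhile (· ≠ '#')) = t.dropWhile (· ≠ '#') := by
        simp [List.dropWhile_cons]
      rw [hd] at h
      rw [show countsOf ('.' :: t) = 0 :: countsOf t from by simp [countsOf]]
      rw [List.dropLast_cons_of_ne_nil (countsOf_ne_nil t)]
      simp only [List.filter_cons]
      rw [if_neg (by simp)]
      exact ih h
    by_cases h2 : c = '#'
    · subst h2
      have hd : (('#' :: t).dropWhile (· ≠ '#')) = '#' :: t := by simp [List.dropWhile_cons]
      rw [hd] at h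
      have hnt : '.' ∉ t := fun hm => h (List.mem_cons_of_mem _ hm)
      have hlen : (countsOf t).length = 1 := by
        rw [countsOf_length, List.count_eq_zero_of_not_mem hnt]
      obtain ⟨c0, hct⟩ : ∃ c0, countsOf t = [c0] := by
        cases h : countsOf t with
        | nil => exact absurd h (countsOf_ne_nil t)
        | cons a b =>
          rw [h] at hlen
          simp at hlen
          exact ⟨a, by rw [hlen]⟩
      simp [countsOf, hct]
    · have hd : ((c :: t).dropWhile (· ≠ '#')) = t.dropWhile (· ≠ '#') := by
        simp [List.dropWhile_cons, h2]
      rw [hd] at h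
      obtain ⟨c0, r, hct⟩ : ∃ c0 r, countsOf t = c0 :: r := by
        cases h : countsOf t with
        | nil => exact absurd h (countsOf_ne_nil t)
        | cons a b => exact ⟨a, b, rfl⟩
      simp only [countsOf, if_neg hc, hct, if_neg h2, zero_add]
      rw [← hct]
      exact ih h

-- A's loop over the closed groups equals B's single slice comparison
theorem loop_closed_form (X : Bool) (expected : List Int) (closed : List Int) : ∀ (j : Nat),
    j < expected.length →
    (match completeGroupsLoop closed expected (j : Int) with
     | some b => b
     | none => X)
    = if closed.take (expected.length - j) = (expected.drop j).take closed.length then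
        (if expected.length - j ≤ closed.length then true else X)
      else false := by
  induction closed with
  | nil =>
    intro j hj
    simp only [completeGroupsLoop, List.take_nil, List.length_nil, List.take_zero]
    rw [if_pos trivial, if_neg (by omega)]
  | cons c rest ih =>
    intro j hj
    have hget : (PySem.List.pyGet? expected (j : Int)).getD 0 = expected[j] := by
      rw [PySem.List.pyGet?_natCast]
      simp [List.getElem?_eq_getElem hj]
    have hdrop : expected.drop j = expected[j] :: expected.drop (j + 1) :=
      (List.drop_eq_getElem_cons hj)
    have htake1 : (k : Nat) → 0 < k → (c :: rest).take k = c :: rest.take (k - 1) := by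
      intro k hk
      cases k with
      | zero => omega
      | succ m => simp
    simp only [completeGroupsLoop, hget]
    by_cases hc : c = expected[j]
    · rw [if_neg (show ¬ (c != expected[j]) = true from by simp [hc])]
      by_cases hend : j + 1 = expected.length
      · rw [if_pos (show ((j : Int) + 1 == (expected.length : Int)) = true from by
          simp; omega)]
        have hkj : expected.length - j = 1 := by omega
        rw [hkj, htake1 1 (by omega), hdrop]
        simp [hc, List.take_zero, List.drop_eq_nil_of_le (by omega : expected.length ≤ j + 1)]
      · rw [if_neg (show ¬ ((j : Int) + 1 == (expected.length : Int)) = true from by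
          simp; omega)]
        have hj1 : j + 1 < expected.length := by omega
        rw [show ((j : Int) + 1) = ((j + 1 : Nat) : Int) from by push_cast; ring]
        rw [ih (j + 1) hj1]
        rw [htake1 (expected.length - j) (by omega), hdrop]
        have e1 : expected.length - j - 1 = expected.length - (j + 1) := by omega
        simp only [List.length_cons, List.take_succ_cons, List.cons.injEq, e1]
        by_cases heq : rest.take (expected.length - (j + 1)) = (expected.drop (j + 1)).take rest.length
        · rw [if_pos heq, if_pos (And.intro hc heq)]
          by_cases hle : expected.length - (j + 1) ≤ rest.length
          · rw [if_pos hle, if_pos (show expected.length - j ≤ rest.length + 1 from by omega)]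
          · rw [if_neg hle, if_neg (show ¬ expected.length - j ≤ rest.length + 1 from by omega)]
        · rw [if_neg heq,
            if_neg (show ¬ (c = expected[j] ∧ rest.take (expected.length - (j + 1)) = (expected.drop (j + 1)).take rest.length) from
              fun hcontra => heq hcontra.2)]
    · rw [if_pos (show (c != expected[j]) = true from by simp [hc])]
      rw [htake1 (expected.length - j) (by omega), hdrop]
      simp only [List.length_cons, List.take_succ_cons, List.cons.injEq]
      rw [if_neg (show ¬ (c = expected[j] ∧ rest.take (expected.length - j - 1) = (expected.drop (j + 1)).take rest.length) from
          fun hcontra => hc hcontra.1)]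

-- the common core: A's loop-with-fallback equals B's slice-comparison expression
theorem core_eq (ct : List Int) (hct : ct ≠ []) (expected : List Int) (unknown : Bool)
    (hk : expected.length = 0 → (ct.dropLast.filter (fun c => decide (c > 0))) = []) :
    (match completeGroupsLoop (ct.dropLast.filter (fun c => decide (c > 0))) expected 0 with
     | some b => b
     | none =>
       if unknown then true
       else (decide ((0 : Int) + (((ct.dropLast.filter (fun c => decide (c > 0))).length : Nat) : Int) = (expected.length : Int)))
         || (ct.getLast?.getD 0 == (PySem.List.pyGet? expected ((0 : Int) + (((ct.dropLast.filter (fun c => decide (c > 0))).length : Nat) : Int))).getD 0))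
    = (if (ct.dropLast.filter (fun c => decide (c > 0))).take expected.length
           ≠ expected.take (ct.dropLast.filter (fun c => decide (c > 0))).length then false
       else decide ((ct.dropLast.filter (fun c => decide (c > 0))).length ≥ expected.length) || unknown
         || ((PySem.List.pyGet? ct (-1)).getD 0 == (PySem.List.pyGet? expected (((ct.dropLast.filter (fun c => decide (c > 0))).length : Nat) : Int)).getD 0)) := by
  set closed := ct.dropLast.filter (fun c => decide (c > 0)) with hcl
  by_cases hk0 : expected.length = 0
  · have hc0 : closed = [] := hk hk0
    have he : expected = [] := List.eq_nil_of_length_eq_zero hk0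
    subst he
    rw [hc0]
    simp [completeGroupsLoop]
  · have hkpos : 0 < expected.length := by omega
    have := loop_closed_form
      (if unknown then true
       else (decide ((0 : Int) + ((closed.length : Nat) : Int) = (expected.length : Int)))
         || (ct.getLast?.getD 0 == (PySem.List.pyGet? expected ((0 : Int) + ((closed.length : Nat) : Int))).getD 0))
      expected closed 0 hkpos
    rw [show ((0 : Nat) : Int) = (0 : Int) from rfl] at this
    rw [this]
    simp only [Nat.sub_zero, List.drop_zero, ite_not]
    by_cases heq : closed.take expected.length = expected.take closed.length
    · rw [if_pos heq, if_pos heq]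
      by_cases hle : expected.length ≤ closed.length
      · rw [if_pos hle]
        simp [ge_iff_le, hle]
      · rw [if_neg hle]
        rw [show (decide (closed.length ≥ expected.length)) = false from by simp; omega]
        rw [show (decide ((0 : Int) + ((closed.length : Nat) : Int) = (expected.length : Int))) = false from by
          simp; omega]
        rw [pyGet?_neg_one_getLast? ct hct]
        simp only [Bool.false_or, zero_add]
        cases unknown <;> simp
    · rw [if_neg heq, if_neg heq]

theorem altRun_zero (l : List Char) (expected : List Int) :
    altRun l 0 0 expected
    = (match completeGroupsLoop (((countsOf (l.takeWhile (· ≠ '?'))).dropLast.filter (fun c => decide (c > 0)))) expected 0 with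
       | some b => b
       | none =>
         if l.contains '?' then true
         else (decide ((0 : Int) + ((((countsOf (l.takeWhile (· ≠ '?'))).dropLast.filter (fun c => decide (c > 0))).length : Nat) : Int) = (expected.length : Int)))
           || ((countsOf (l.takeWhile (· ≠ '?'))).getLast?.getD 0 == (PySem.List.pyGet? expected ((0 : Int) + ((((countsOf (l.takeWhile (· ≠ '?'))).dropLast.filter (fun c => decide (c > 0))).length : Nat) : Int))).getD 0)) := by
  unfold altRun
  rw [bump_zero]

theorem alt_eq (candidate : String) (expected : List Int)
    (hpre : Pre_complete_groups candidate expected) :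
    complete_groups candidate expected = complete_groups_alt candidate expected := by
  rw [complete_groups, main_go_eq]
  unfold complete_groups_alt
  by_cases hfind : PySem.Str.find candidate "?" = -1
  · -- no '?': head is the whole string
    have hnin : ¬ ['?'] <:+: candidate.toList := by
      rw [PySem.Str.find_eq] at hfind
      simpa using (PySem.Chars.find_eq_neg_one_iff candidate.toList ['?']).mp hfind
    have hmem : '?' ∉ candidate.toList := fun hm => by
      obtain ⟨s1, s2, hs⟩ := List.append_of_mem hm
      exact hnin ⟨s1, s2, by simp [hs]⟩
    have htw : candidate.toList.takeWhile (· ≠ '?') = candidate.toList := by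
      rw [List.takeWhile_eq_self_iff]
      intro x hx
      simp
      exact fun hxq => hmem (hxq ▸ hx)
    have hcont : candidate.toList.contains '?' = false := by
      simpa using hmem
    have hq : (PySem.Str.find candidate "?" < 0) := by rw [hfind]; omega
    have hqge : decide (PySem.Str.find candidate "?" ≥ 0) = false := by
      rw [hfind]; simp
    simp only [if_pos hq, hqge, counts_eq]
    rw [altRun_zero, hcont]
    rw [core_eq (countsOf (candidate.toList.takeWhile (· ≠ '?'))) (countsOf_ne_nil _) expected false
      (by
        intro hk0
        rcases hpre with hne | hnd
        · exact absurd (List.eq_nil_of_length_eq_zero hk0) hne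
        · exact closed_nil _ hnd)]
    rw [htw]
  · -- there is a '?': head is the prefix before it
    have hge : 0 ≤ PySem.Str.find candidate "?" := by
      have := PySem.Chars.neg_one_le_find candidate.toList ['?']
      rw [PySem.Str.find_eq]
      rw [PySem.Str.find_eq] at hfind
      simp only [show ("?" : String).toList = ['?'] from rfl] at *
      omega
    have hq : ¬ (PySem.Str.find candidate "?" < 0) := by omega
    have hqge : decide (PySem.Str.find candidate "?" ≥ 0) = true := by simpa using hge
    have hfc : PySem.Chars.find candidate.toList ['?'] = PySem.Str.find candidate "?" := by
      rw [PySem.Str.find_eq]; rfl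
    have hspec := PySem.Chars.find_spec (by rwa [hfc] :
      0 ≤ PySem.Chars.find candidate.toList ['?'])
    rw [hfc] at hspec
    have hmem : '?' ∈ candidate.toList := by
      have h1 := hspec.1
      rw [singleton_prefix_iff] at h1
      rw [List.head?_drop] at h1
      exact List.mem_of_getElem? h1
    have hcont : candidate.toList.contains '?' = true := by simpa using hmem
    have hhead : (PySem.Str.slice candidate none (some (PySem.Str.find candidate "?"))).toList
        = candidate.toList.takeWhile (· ≠ '?') := by
      rw [PySem.Str.toList_slice]
      rw [show PySem.Chars.slice candidate.toList none (some (PySem.Str.find candidate "?"))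
          = candidate.toList.take (PySem.Str.find candidate "?").toNat from
        PySem.List.slice_to _ hge]
      apply take_eq_takeWhile
      · intro j hj
        have h2 := hspec.2 j hj
        rw [singleton_prefix_iff, List.head?_drop] at h2
        exact h2
      · have h1 := hspec.1
        rw [singleton_prefix_iff, List.head?_drop] at h1
        exact h1
    simp only [if_neg hq, hqge, hhead, counts_eq]
    rw [altRun_zero, hcont]
    rw [core_eq (countsOf (candidate.toList.takeWhile (· ≠ '?'))) (countsOf_ne_nil _) expected true
      (by
        intro hk0
        rcases hpre with hne | hnd
        · exact absurd (List.eq_nil_of_length_eq_zero hk0) hne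
        · exact closed_nil _ hnd)]

-- ===== VERDICT (by name: the statement is the Claim_ definition above) =====
theorem complete_groups_spec : Claim_equal_complete_groups := by
  intro candidate expected _ hpre
  unfold Spec_complete_groups
  exact alt_eq candidate expected hpre
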